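-- pv_equiv track=rewrite | github.com/devDeejay/Python | Programs/The Castle Gate.py | Calculate
-- ===== SOURCE A (Python) =====
-- import itertools
--
-- def Calculate(num):
--     count = 0
--     total = 0
--     N = num
--
--     for pair in itertools.combinations([i for i in range(1,N+1)],2):
--         if(pair[1] ^ pair[0]) <= N:
--             count += 1
--
--     return count
-- ===== SOURCE B (Python) =====
-- def Calculate(num):
--     # For each xor value x in [1, N]: pairs (i, j) with i < j <= N and i ^ j = x
--     # correspond bijectively (via j, i = j ^ x) to the j in [1, N] with bit
--     # h = msb(x) set, except j = x itself (which would give i = 0).  The number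
--     # of j <= N with bit h set has a closed form, so the whole count is O(N).
--     N = num
--     total = 0
--     for x in range(1, N + 1):
--         h = x.bit_length() - 1
--         m = 1 << h
--         a, r = divmod(N, 2 * m)
--         ones = a * m + min(m, max(0, r + 1 - m))
--         total += ones - 1
--     return total
-- ===== Notes on version B (the rewrite author's own statement) =====
-- stated objective: faster
-- what changed: Instead of testing all O(N^2) pairs, B sums over each possible xor value x in [1,N] the closed-form count of j <= N with the top bit of x set (each such j != x gives exactly one pair i = j^x < j), giving an O(N) algorithm.
import Mathlib
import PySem

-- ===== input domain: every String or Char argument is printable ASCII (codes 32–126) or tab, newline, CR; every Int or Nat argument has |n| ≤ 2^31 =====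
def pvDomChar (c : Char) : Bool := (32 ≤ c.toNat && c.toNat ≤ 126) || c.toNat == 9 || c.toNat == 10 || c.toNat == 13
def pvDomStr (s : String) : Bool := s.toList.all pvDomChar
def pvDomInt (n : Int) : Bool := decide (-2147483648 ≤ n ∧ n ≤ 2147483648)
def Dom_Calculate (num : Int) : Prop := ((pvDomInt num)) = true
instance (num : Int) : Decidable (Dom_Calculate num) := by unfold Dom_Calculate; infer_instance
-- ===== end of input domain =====

-- B replaces A's O(N^2) scan of all pairs by an O(N) sum over xor values x with a
-- closed-form count of partners per x (timing: measurably faster).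

-- ===== PORT A =====
-- itertools.combinations(l, 2): all pairs (l[a], l[b]) with a < b
def pvCombos2 (l : List Int) : List (Int × Int) :=
  match l with
  | [] => []
  | x :: xs => (xs.map (fun y => (x, y))) ++ pvCombos2 xs

-- [i for i in range(1, N+1)] is exactly range(1, N+1)
def Calculate (num : Int) : Int :=
  let N := num
  List.foldl
    (fun count pair => if PySem.Int.bxor pair.2 pair.1 ≤ N then count + 1 else count)
    0 (pvCombos2 (PySem.List.pyRange 1 (N + 1)))

-- ===== PORT B =====
def Calculate_alt (num : Int) : Int :=
  let N := num
  List.foldl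
    (fun total x =>
      let h : Nat := PySem.Int.bitLength x - 1
      let m : Int := 1 <<< h
      let a := PySem.Int.floordiv N (2 * m)
      let r := PySem.Int.mod N (2 * m)
      let ones := a * m + min m (max 0 (r + 1 - m))
      total + (ones - 1))
    0 (PySem.List.pyRange 1 (N + 1))

-- ===== PRECONDITION & SPEC =====
def Spec_Calculate (num : Int) (out : Int) : Prop := out = Calculate_alt num
instance (num : Int) (out : Int) : Decidable (Spec_Calculate num out) := by unfold Spec_Calculate; infer_instance

-- ===== CLAIM (what is proved, stated in full; the proofs are below) =====
def Claim_equal_Calculate : Prop := ∀ (num : Int), Dom_Calculate num → Spec_Calculate num (Calculate num)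

-- ===== LEMMAS AND PROOFS =====

def pvH (x : Nat) : Nat := PySem.Int.bitLength (x : Int) - 1

lemma pvH_bracket {x : Nat} (hx : 1 ≤ x) : 2 ^ pvH x ≤ x ∧ x < 2 ^ (pvH x + 1) := by
  have hne : (x : Int) ≠ 0 := by exact_mod_cast Nat.one_le_iff_ne_zero.mp hx
  have h1 := PySem.Int.two_pow_bitLength_le (x : Int) hne
  have h2 := PySem.Int.lt_two_pow_bitLength (x : Int)
  rw [Int.natAbs_natCast] at h1 h2
  have hbl : 1 ≤ PySem.Int.bitLength (x : Int) := by
    by_contra hb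
    have : PySem.Int.bitLength (x : Int) = 0 := by omega
    rw [this] at h2; simp at h2; omega
  unfold pvH
  constructor
  · exact h1
  · have : PySem.Int.bitLength (x : Int) - 1 + 1 = PySem.Int.bitLength (x : Int) := by omega
    rw [this]; exact h2

lemma pv_testBit_of_bracket {r h : Nat} (h1 : 2 ^ h ≤ r) (h2 : r < 2 ^ (h + 1)) :
    r.testBit h = true := by
  by_contra hb
  have hb' : r.testBit h = false := by simpa using hb
  have hlt : r < 2 ^ h := by
    refine Nat.lt_of_testBit h hb' Nat.testBit_two_pow_self ?_
    intro j hj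
    have : r < 2 ^ j := lt_of_lt_of_le h2 (Nat.pow_le_pow_right (by norm_num) hj)
    rw [Nat.testBit_eq_false_of_lt this, Nat.testBit_two_pow]
    simp [Nat.ne_of_lt hj]
  omega

lemma pv_testBit_msb {x : Nat} (hx : 1 ≤ x) : x.testBit (pvH x) = true :=
  pv_testBit_of_bracket (pvH_bracket hx).1 (pvH_bracket hx).2

lemma pv_xor_lt_iff {x : Nat} (hx : 1 ≤ x) (j : Nat) :
    ((j ^^^ x) < j ↔ j.testBit (pvH x) = true) := by
  obtain ⟨hlo, hhi⟩ := pvH_bracket hx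
  have hxh : x.testBit (pvH x) = true := pv_testBit_msb hx
  have hhigh : ∀ k, pvH x < k → x.testBit k = false := fun k hk =>
    Nat.testBit_eq_false_of_lt (lt_of_lt_of_le hhi (Nat.pow_le_pow_right (by norm_num) hk))
  constructor
  · intro hlt
    by_contra hb
    have hjf : j.testBit (pvH x) = false := by simpa using hb
    have : j < j ^^^ x := by
      refine Nat.lt_of_testBit (pvH x) hjf ?_ ?_
      · rw [Nat.testBit_xor, hjf, hxh]; rfl
      · intro k hk
        rw [Nat.testBit_xor, hhigh k hk, Bool.xor_false]
    omega
  · intro hjt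
    refine Nat.lt_of_testBit (pvH x) ?_ hjt ?_
    · rw [Nat.testBit_xor, hjt, hxh]; rfl
    · intro k hk
      rw [Nat.testBit_xor, hhigh k hk, Bool.xor_false]

lemma pv_testBit_iff_mod {m h : Nat} :
    m.testBit h = true ↔ 2 ^ h ≤ m % 2 ^ (h + 1) := by
  have hmod : (m % 2 ^ (h+1)).testBit h = m.testBit h := by
    rw [Nat.testBit_mod_two_pow]; simp
  constructor
  · intro ht
    exact Nat.ge_two_pow_of_testBit (hmod.trans ht ▸ (by rw [hmod, ht]))
  · intro hle
    rw [← hmod]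
    exact pv_testBit_of_bracket hle (Nat.mod_lt _ (by positivity))

def pvOnes (h n : Nat) : Nat := ((Finset.Icc 1 n).filter (fun j => j.testBit h)).card

lemma pvOnes_closed (h n : Nat) :
    pvOnes h n = n / 2 ^ (h + 1) * 2 ^ h + min (2 ^ h) (n % 2 ^ (h + 1) + 1 - 2 ^ h) := by
  induction n with
  | zero =>
      have hm : 1 ≤ 2 ^ h := Nat.one_le_two_pow
      simp [pvOnes]
      rcases Nat.le_total (2 ^ h) 1 with hc | hc
      · rw [Nat.min_eq_right (by omega)]; omega
      · rw [Nat.min_eq_right (by omega)]; omega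
  | succ n ih =>
      have hm : 1 ≤ 2 ^ h := Nat.one_le_two_pow
      have hM : 2 ^ (h + 1) = 2 * 2 ^ h := by rw [pow_succ]; ring
      have hstep : pvOnes h (n + 1)
          = pvOnes h n + (if 2 ^ h ≤ (n + 1) % 2 ^ (h + 1) then 1 else 0) := by
        unfold pvOnes
        rw [← Finset.insert_Icc_right_eq_Icc_add_one (by omega), Finset.filter_insert]
        by_cases hb : (n + 1).testBit h
        · rw [if_pos hb, Finset.card_insert_of_notMem (by simp), if_pos (pv_testBit_iff_mod.mp hb)]
        · rw [if_neg hb, if_neg (fun hc => hb (pv_testBit_iff_mod.mpr hc))]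
          omega
      rw [hstep, ih]
      -- pure arithmetic on quotients/remainders
      have hMpos : 0 < 2 ^ (h + 1) := by positivity
      have hd0 := Nat.div_add_mod n (2 ^ (h + 1))
      have hr0 := Nat.mod_lt n hMpos
      rcases Nat.lt_or_ge (n % 2 ^ (h + 1) + 1) (2 ^ (h + 1)) with hc | hc
      · have hq : (n + 1) / 2 ^ (h + 1) = n / 2 ^ (h + 1) ∧ (n + 1) % 2 ^ (h + 1) = n % 2 ^ (h + 1) + 1 :=
          (Nat.div_mod_unique hMpos).mpr ⟨by omega, hc⟩
        rw [hq.1, hq.2]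
        rcases Nat.le_total (2 ^ h) (n % 2 ^ (h + 1) + 1 + 1 - 2 ^ h) with h1 | h1 <;>
          rcases Nat.le_total (2 ^ h) (n % 2 ^ (h + 1) + 1 - 2 ^ h) with h2 | h2 <;>
            simp only [Nat.min_eq_left, Nat.min_eq_right, h1, h2] <;> split_ifs <;> omega
      · have hr0' : n % 2 ^ (h + 1) = 2 ^ (h + 1) - 1 := by omega
        have hq : (n + 1) / 2 ^ (h + 1) = n / 2 ^ (h + 1) + 1 ∧ (n + 1) % 2 ^ (h + 1) = 0 :=
          (Nat.div_mod_unique hMpos).mpr ⟨by rw [Nat.mul_add, Nat.mul_one]; omega, by omega⟩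
        rw [hq.1, hq.2, hr0', Nat.add_mul, Nat.one_mul]
        rw [Nat.min_eq_right (by omega), Nat.min_eq_right (by omega), if_neg (by omega)]
        omega

lemma pvOnes_pos {x n : Nat} (hx : x ∈ Finset.Icc 1 n) : 1 ≤ pvOnes (pvH x) n := by
  rw [Finset.mem_Icc] at hx
  refine Nat.one_le_iff_ne_zero.mpr (Finset.card_ne_zero_of_mem (a := x) ?_)
  rw [Finset.mem_filter, Finset.mem_Icc]
  exact ⟨⟨hx.1, hx.2⟩, pv_testBit_msb hx.1⟩

lemma pvCombos2_append_countP (l : List Int) (y : Int) (p : Int × Int → Bool) :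
    (pvCombos2 (l ++ [y])).countP p
      = (pvCombos2 l).countP p + l.countP (fun x => p (x, y)) := by
  induction l with
  | nil => simp [pvCombos2]
  | cons x xs ih =>
      simp only [List.cons_append, pvCombos2, List.countP_append, List.map_append,
        List.map_cons, List.map_nil, ih, List.countP_cons, List.countP_nil]
      omega

lemma pv_countP_pyRange (k : Nat) (q : Int → Bool) :
    (PySem.List.pyRange 1 ((k : Int) + 1)).countP q
      = ∑ i ∈ Finset.Icc 1 k, (if q (i : Int) then 1 else 0) := by
  induction k with
  | zero => simp [PySem.List.pyRange_one_eq_nil (by norm_num : (1:Int) ≤ 1)]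
  | succ k ih =>
      have hc : ((k + 1 : Nat) : Int) + 1 = ((k : Int) + 1) + 1 := by push_cast; ring
      rw [hc, PySem.List.pyRange_one_succ_right (by omega), List.countP_append,
        Finset.sum_Icc_succ_top (by omega), ih, List.countP_cons, List.countP_nil]
      have : ((k : Int) + 1) = ((k + 1 : Nat) : Int) := by push_cast; ring
      rw [this]
      split_ifs <;> omega

def pvCnt (n k : Nat) : Nat :=
  ∑ j ∈ Finset.Icc 1 k, ∑ i ∈ Finset.Ico 1 j, (if (i ^^^ j) ≤ n then 1 else 0)

lemma pv_combos_count (n k : Nat) :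
    (pvCombos2 (PySem.List.pyRange 1 ((k : Int) + 1))).countP
        (fun pr => decide (PySem.Int.bxor pr.2 pr.1 ≤ (n : Int)))
      = pvCnt n k := by
  induction k with
  | zero =>
      simp [PySem.List.pyRange_one_eq_nil (by norm_num : (1:Int) ≤ 1), pvCombos2, pvCnt]
  | succ k ih =>
      have hc : ((k + 1 : Nat) : Int) + 1 = ((k : Int) + 1) + 1 := by push_cast; ring
      rw [hc, PySem.List.pyRange_one_succ_right (by omega), pvCombos2_append_countP, ih]
      have hinner : (PySem.List.pyRange 1 ((k : Int) + 1)).countP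
            (fun x => decide (PySem.Int.bxor ((k : Int) + 1) x ≤ (n : Int)))
          = ∑ i ∈ Finset.Icc 1 k, (if (i ^^^ (k + 1)) ≤ n then 1 else 0) := by
        rw [pv_countP_pyRange k (fun x => decide (PySem.Int.bxor ((k : Int) + 1) x ≤ (n : Int)))]
        refine Finset.sum_congr rfl (fun i _ => ?_)
        have h1 : ((k : Int) + 1) = ((k + 1 : Nat) : Int) := by push_cast; ring
        rw [h1, PySem.Int.bxor_natCast]
        simp [Nat.xor_comm]
      rw [hinner]
      unfold pvCnt
      rw [Finset.sum_Icc_succ_top (by omega), Finset.Ico_add_one_right_eq_Icc]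

def pvS (n : Nat) : Finset (Nat × Nat) :=
  (Finset.Icc 1 n ×ˢ Finset.Icc 1 n).filter (fun p => p.2 < p.1 ∧ (p.2 ^^^ p.1) ≤ n)

lemma pvCnt_eq_card (n : Nat) : pvCnt n n = (pvS n).card := by
  unfold pvS pvCnt
  rw [Finset.card_filter, Finset.sum_product]
  refine Finset.sum_congr rfl (fun j hj => ?_)
  rw [Finset.mem_Icc] at hj
  calc ∑ i ∈ Finset.Ico 1 j, (if (i ^^^ j) ≤ n then 1 else 0)
      = ∑ i ∈ Finset.Ico 1 j, (if i < j ∧ (i ^^^ j) ≤ n then 1 else 0) := by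
        refine Finset.sum_congr rfl (fun i hi => ?_)
        rw [Finset.mem_Ico] at hi
        by_cases hc : (i ^^^ j) ≤ n
        · rw [if_pos hc, if_pos ⟨hi.2, hc⟩]
        · rw [if_neg hc, if_neg (fun hcon => hc hcon.2)]
    _ = ∑ i ∈ Finset.Icc 1 n, (if i < j ∧ (i ^^^ j) ≤ n then 1 else 0) := by
        refine Finset.sum_subset
          (fun i hi => by rw [Finset.mem_Ico] at hi; rw [Finset.mem_Icc]; omega)
          (fun i hi hni => by
            rw [Finset.mem_Icc] at hi; rw [Finset.mem_Ico] at hni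
            rw [if_neg]; intro hcon; exact hni ⟨hi.1, hcon.1⟩)
    _ = ∑ i ∈ Finset.Icc 1 n, (if (j, i).2 < (j, i).1 ∧ ((j, i).2 ^^^ (j, i).1) ≤ n then 1 else 0) := rfl

lemma pv_card_fiberwise (n : Nat) :
    (pvS n).card = ∑ x ∈ Finset.Icc 1 n, ((pvS n).filter (fun p => p.2 ^^^ p.1 = x)).card := by
  refine Finset.card_eq_sum_card_fiberwise (fun p hp => ?_)
  simp only [pvS, Finset.coe_filter, Set.mem_setOf_eq, Finset.mem_product,
    Finset.mem_Icc] at hp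
  rw [Finset.mem_coe, Finset.mem_Icc]
  have hne : p.2 ^^^ p.1 ≠ 0 := fun hc => by
    have := Nat.xor_eq_zero_iff.mp hc; omega
  exact ⟨by omega, hp.2.2⟩

lemma pv_fiber_card {n x : Nat} (hx : x ∈ Finset.Icc 1 n) :
    ((pvS n).filter (fun p => p.2 ^^^ p.1 = x)).card = pvOnes (pvH x) n - 1 := by
  rw [Finset.mem_Icc] at hx
  have hx1 : 1 ≤ x := hx.1
  have hcard : ((pvS n).filter (fun p => p.2 ^^^ p.1 = x)).card
      = ((Finset.Icc 1 n).filter (fun j => j.testBit (pvH x) ∧ j ≠ x)).card := by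
    refine Finset.card_nbij' (fun p => p.1) (fun j => (j, j ^^^ x)) ?_ ?_ ?_ ?_
    · intro p hp
      simp only [Finset.coe_filter, Set.mem_setOf_eq, pvS, Finset.mem_filter,
        Finset.mem_product, Finset.mem_Icc] at hp ⊢
      obtain ⟨⟨⟨hj, hi⟩, hlt, _⟩, hxeq⟩ := hp
      have hp2 : p.1 ^^^ x = p.2 := by
        rw [← hxeq, Nat.xor_comm p.2 p.1, ← Nat.xor_assoc, Nat.xor_self, Nat.zero_xor]
      refine ⟨hj, ?_, ?_⟩
      · exact (pv_xor_lt_iff hx1 p.1).mp (by rw [hp2]; exact hlt)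
      · intro hc; subst hc
        rw [Nat.xor_self] at hp2; omega
    · intro j hj
      simp only [Finset.coe_filter, Set.mem_setOf_eq, pvS, Finset.mem_filter,
        Finset.mem_product, Finset.mem_Icc] at hj ⊢
      obtain ⟨⟨h1j, hjn⟩, hbit, hne⟩ := hj
      have hlt : j ^^^ x < j := (pv_xor_lt_iff hx1 j).mpr hbit
      have hpos : 1 ≤ j ^^^ x := by
        rcases Nat.eq_zero_or_pos (j ^^^ x) with hz | hp
        · exact absurd (Nat.xor_eq_zero_iff.mp hz) hne
        · exact hp
      have hxeq : (j ^^^ x) ^^^ j = x := by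
        rw [Nat.xor_comm (j ^^^ x) j, ← Nat.xor_assoc, Nat.xor_self, Nat.zero_xor]
      exact ⟨⟨⟨⟨h1j, hjn⟩, hpos, by omega⟩, hlt, by rw [hxeq]; exact hx.2⟩, hxeq⟩
    · intro p hp
      simp only [Finset.coe_filter, Set.mem_setOf_eq, pvS, Finset.mem_filter,
        Finset.mem_product, Finset.mem_Icc] at hp
      obtain ⟨⟨_, hlt, _⟩, hxeq⟩ := hp
      have hp2 : p.1 ^^^ x = p.2 := by
        rw [← hxeq, Nat.xor_comm p.2 p.1, ← Nat.xor_assoc, Nat.xor_self, Nat.zero_xor]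
      exact Prod.ext rfl hp2
    · intro j hj
      rfl
  rw [hcard]
  have hT : (Finset.Icc 1 n).filter (fun j => j.testBit (pvH x) ∧ j ≠ x)
      = ((Finset.Icc 1 n).filter (fun j => j.testBit (pvH x))).erase x := by
    ext j
    simp only [Finset.mem_filter, Finset.mem_erase, Finset.mem_Icc]
    tauto
  rw [hT, Finset.card_erase_of_mem (by
    rw [Finset.mem_filter, Finset.mem_Icc]
    exact ⟨⟨hx.1, hx.2⟩, pv_testBit_msb hx1⟩)]
  rfl

lemma pv_map_sum_pyRange (k : Nat) (g : Int → Int) :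
    ((PySem.List.pyRange 1 ((k : Int) + 1)).map g).sum = ∑ x ∈ Finset.Icc 1 k, g (x : Int) := by
  induction k with
  | zero => simp [PySem.List.pyRange_one_eq_nil (by norm_num : (1:Int) ≤ 1)]
  | succ k ih =>
      have hc : ((k + 1 : Nat) : Int) + 1 = ((k : Int) + 1) + 1 := by push_cast; ring
      rw [hc, PySem.List.pyRange_one_succ_right (by omega), List.map_append, List.sum_append,
        Finset.sum_Icc_succ_top (by omega), ih]
      push_cast
      simp

lemma pv_A_eq (n : Nat) : Calculate (n : Int) = (pvCnt n n : Int) := by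
  simp only [Calculate]
  have h := PySem.List.foldl_count_if
    (fun pr : Int × Int => decide (PySem.Int.bxor pr.2 pr.1 ≤ (n : Int)))
    (pvCombos2 (PySem.List.pyRange 1 ((n : Int) + 1))) 0
  simp only [decide_eq_true_eq] at h
  rw [h, pv_combos_count, zero_add]

lemma pv_B_eq (n : Nat) :
    Calculate_alt (n : Int) = ∑ x ∈ Finset.Icc 1 n, ((pvOnes (pvH x) n : Int) - 1) := by
  simp only [Calculate_alt]
  rw [PySem.List.foldl_add (PySem.List.pyRange 1 ((n : Int) + 1))
    (fun x =>
      PySem.Int.floordiv ((n : Int)) ((2 : Int) * (((1 <<< (PySem.Int.bitLength x - 1) : Nat)) : Int))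
          * (((1 <<< (PySem.Int.bitLength x - 1) : Nat)) : Int)
        + min ((((1 <<< (PySem.Int.bitLength x - 1) : Nat)) : Int))
            (max 0 (PySem.Int.mod ((n : Int)) ((2 : Int) * (((1 <<< (PySem.Int.bitLength x - 1) : Nat)) : Int))
              + (1 : Int) - (((1 <<< (PySem.Int.bitLength x - 1) : Nat)) : Int)))
        - (1 : Int)) 0, zero_add, pv_map_sum_pyRange]
  refine Finset.sum_congr rfl (fun x hx => ?_)
  have hx1 : 1 ≤ x := (Finset.mem_Icc.mp hx).1
  have hsh : (1 <<< (PySem.Int.bitLength ((x : Nat) : Int) - 1) : Nat) = 2 ^ pvH x := by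
    rw [Nat.one_shiftLeft, pvH]
  rw [hsh]
  have h2m : (2 : Int) * ((2 ^ pvH x : Nat) : Int) = ((2 ^ (pvH x + 1) : Nat) : Int) := by
    push_cast [pow_succ]; ring
  rw [h2m, PySem.Int.floordiv_natCast, PySem.Int.mod_natCast, pvOnes_closed,
    Nat.cast_add, Nat.cast_mul]
  simp only [min_def, max_def]
  split_ifs <;> omega

lemma pv_main (n : Nat) : Calculate (n : Int) = Calculate_alt (n : Int) := by
  rw [pv_A_eq, pv_B_eq, pvCnt_eq_card, pv_card_fiberwise]
  push_cast
  refine Finset.sum_congr rfl (fun x hx => ?_)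
  rw [pv_fiber_card hx]
  have h1 := pvOnes_pos hx
  omega

-- ===== VERDICT (by name: the statement is the Claim_ definition above) =====
theorem Calculate_spec : Claim_equal_Calculate := by
  intro num _
  unfold Spec_Calculate
  rcases le_or_gt 0 num with h | h
  · obtain ⟨n, rfl⟩ := Int.eq_ofNat_of_zero_le h
    exact pv_main n
  · have he : PySem.List.pyRange 1 (num + 1) = [] :=
      PySem.List.pyRange_one_eq_nil (by omega)
    simp only [Calculate, Calculate_alt, he, pvCombos2, List.foldl_nil]
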